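-- pv_equiv track=rewrite | github.com/Chad-Su/CITS1402-Project-2 | project_pycharm_v2.py | findCategory
-- ===== SOURCE A (Python) =====
-- def findCategory(locls):
--     '''
--     :param locls: A filtered list that contains the entire line of information
--                   for all the specified LocId in the file.
--     :return: A dictionary， that takes all location category information as
--              keys and the number of occurrences of the corresponding
--              location category in the argument list as value.
--     '''
--     dic = {}
--     cat = ['P', 'H', 'R', 'C', 'S']
--     for i in cat:
--         counter = 0
--         for item in locls:
--             if item[3].upper() == i:
--                 counter += 1
--             dic[i] = counter
--     return dic
-- ===== SOURCE B (Python) =====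
-- def findCategory(locls):
--     p = h = r = c = s = 0
--     for item in locls:
--         k = item[3].upper()
--         if k == 'P':
--             p += 1
--         elif k == 'H':
--             h += 1
--         elif k == 'R':
--             r += 1
--         elif k == 'C':
--             c += 1
--         elif k == 'S':
--             s += 1
--     return {'P': p, 'H': h, 'R': r, 'C': c, 'S': s}
-- ===== Notes on version B (the rewrite author's own statement) =====
-- stated objective: alternative
-- what changed: B makes a single pass over locls with five scalar counters and builds the result dict once at the end, instead of A's five full scans of locls (one per category) with a dict assignment inside the inner loop.
-- intended difference: On the empty list A returns {} because its dict entries are only assigned inside the inner loop, while B returns the intended all-zero dict {'P':0,'H':0,'R':0,'C':0,'S':0}, matching the docstring's promise that all category keys are present. — e.g. on findCategory([]): A returns [], B returns [("P", 0), ("H", 0), ("R", 0), ("C", 0), ("S", 0)]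
import Mathlib
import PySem

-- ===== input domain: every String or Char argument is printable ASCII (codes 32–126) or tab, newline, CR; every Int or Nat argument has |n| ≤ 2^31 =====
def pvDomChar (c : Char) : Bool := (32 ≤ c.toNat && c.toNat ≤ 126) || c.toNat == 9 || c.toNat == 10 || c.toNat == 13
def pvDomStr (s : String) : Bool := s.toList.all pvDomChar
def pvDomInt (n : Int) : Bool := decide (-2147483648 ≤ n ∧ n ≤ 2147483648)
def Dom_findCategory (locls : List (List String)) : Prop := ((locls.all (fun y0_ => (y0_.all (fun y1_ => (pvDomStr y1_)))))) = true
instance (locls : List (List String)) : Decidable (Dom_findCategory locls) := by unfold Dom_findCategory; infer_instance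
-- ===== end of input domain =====

-- B makes ONE pass over locls with five scalar counters instead of A's five scans with
-- dict mutation; on the empty list B returns the all-zero dict where A returns {} (see D_).
-- item[3] raises IndexError on rows shorter than 4; Pre_ excludes those (pyGet? would be none).

-- ===== PORT A =====
def findCategory (locls : List (List String)) : List (String × Int) :=
  let cat : List String := ["P", "H", "R", "C", "S"]
  (cat.foldl
    (fun (dic : PySem.Dict String Int) i =>
      (locls.foldl
        (fun (st : Int × PySem.Dict String Int) item =>
          let counter :=
            if PySem.Str.upper ((PySem.List.pyGet? item 3).getD "") == i
            then st.1 + 1 else st.1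
          (counter, st.2.insert i counter))
        (0, dic)).2)
    PySem.Dict.empty).items

-- ===== PORT B =====
def findCategory_alt (locls : List (List String)) : List (String × Int) :=
  let st := locls.foldl
    (fun (st : Int × Int × Int × Int × Int) item =>
      let k := PySem.Str.upper ((PySem.List.pyGet? item 3).getD "")
      if k == "P" then (st.1 + 1, st.2)
      else if k == "H" then (st.1, st.2.1 + 1, st.2.2)
      else if k == "R" then (st.1, st.2.1, st.2.2.1 + 1, st.2.2.2)
      else if k == "C" then (st.1, st.2.1, st.2.2.1, st.2.2.2.1 + 1, st.2.2.2.2)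
      else if k == "S" then (st.1, st.2.1, st.2.2.1, st.2.2.2.1, st.2.2.2.2 + 1)
      else st)
    (0, 0, 0, 0, 0)
  [("P", st.1), ("H", st.2.1), ("R", st.2.2.1), ("C", st.2.2.2.1), ("S", st.2.2.2.2)]

-- ===== PRECONDITION & SPEC =====
-- Pre_ excludes rows with fewer than 4 fields: A raises IndexError on item[3] there.
def Pre_findCategory (locls : List (List String)) : Prop :=
  ∀ item ∈ locls, 4 ≤ item.length
instance (locls : List (List String)) : Decidable (Pre_findCategory locls) := by
  unfold Pre_findCategory; infer_instance
def pvWitness_findCategory : List (List String) := [["1", "x", "y", "p"]]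

-- On the empty list A returns {} (its dict entries are only assigned inside the inner loop),
-- while B returns the all-zero dict over the five category keys, which is the intended value.
def D_findCategory (locls : List (List String)) : Prop := locls = []
instance (locls : List (List String)) : Decidable (D_findCategory locls) := by
  unfold D_findCategory; infer_instance
def Spec_findCategory (locls : List (List String)) (out : List (String × Int)) : Prop :=
  ¬ D_findCategory locls → out = findCategory_alt locls
instance (locls : List (List String)) (out : List (String × Int)) : Decidable (Spec_findCategory locls out) := by
  unfold Spec_findCategory; infer_instance
def pvDiffWitness_findCategory : List (List String) := []
def pvDiffWitnessOut_findCategory : (List (String × Int)) × (List (String × Int)) :=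
  ([], [("P", 0), ("H", 0), ("R", 0), ("C", 0), ("S", 0)])

-- ===== CLAIM =====
def Claim_unchanged_findCategory : Prop := ∀ (locls : List (List String)), Dom_findCategory locls → Pre_findCategory locls → Spec_findCategory locls (findCategory locls)
def Claim_changed_findCategory : Prop := Dom_findCategory (pvDiffWitness_findCategory) ∧ Pre_findCategory (pvDiffWitness_findCategory) ∧ D_findCategory (pvDiffWitness_findCategory) ∧ findCategory (pvDiffWitness_findCategory) = pvDiffWitnessOut_findCategory.1 ∧ findCategory_alt (pvDiffWitness_findCategory) = pvDiffWitnessOut_findCategory.2 ∧ pvDiffWitnessOut_findCategory.1 ≠ pvDiffWitnessOut_findCategory.2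
def Claim_exact_findCategory : Prop := ∀ (locls : List (List String)), Dom_findCategory locls → Pre_findCategory locls → D_findCategory locls → findCategory locls ≠ findCategory_alt locls

-- ===== LEMMAS AND PROOFS =====
-- the uppercased fourth field of a row
def fcKey (item : List String) : String :=
  PySem.Str.upper ((PySem.List.pyGet? item 3).getD "")

-- number of rows whose uppercased fourth field is c
def fcCnt (c : String) (locls : List (List String)) : Int :=
  (locls.countP (fun item => fcKey item == c) : Int)

lemma fcCnt_cons (c : String) (x : List String) (xs : List (List String)) :
    fcCnt c (x :: xs) = (if fcKey x == c then 1 else 0) + fcCnt c xs := by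
  simp only [fcCnt, List.countP_cons]
  split_ifs <;> simp_all <;> omega

-- B's fold computes the five counts
lemma bfold (locls : List (List String)) (p h r c s : Int) :
    locls.foldl
      (fun (st : Int × Int × Int × Int × Int) item =>
        let k := PySem.Str.upper ((PySem.List.pyGet? item 3).getD "")
        if k == "P" then (st.1 + 1, st.2)
        else if k == "H" then (st.1, st.2.1 + 1, st.2.2)
        else if k == "R" then (st.1, st.2.1, st.2.2.1 + 1, st.2.2.2)
        else if k == "C" then (st.1, st.2.1, st.2.2.1, st.2.2.2.1 + 1, st.2.2.2.2)
        else if k == "S" then (st.1, st.2.1, st.2.2.1, st.2.2.2.1, st.2.2.2.2 + 1)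
        else st)
      (p, h, r, c, s)
    = (p + fcCnt "P" locls, h + fcCnt "H" locls, r + fcCnt "R" locls,
       c + fcCnt "C" locls, s + fcCnt "S" locls) := by
  induction locls generalizing p h r c s with
  | nil => simp [fcCnt]
  | cons x xs ih =>
      simp only [List.foldl_cons]
      rw [fcCnt_cons, fcCnt_cons, fcCnt_cons, fcCnt_cons, fcCnt_cons]
      simp only [fcKey]
      split_ifs with h1 h2 h3 h4 h5 <;> rw [ih] <;> clear ih <;> simp_all <;> omega

-- A's inner loop: counter counts the matches; the dict receives i ↦ final counter iff locls ≠ []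
lemma ainner (i : String) (locls : List (List String)) (c0 : Int)
    (dic : PySem.Dict String Int) :
    locls.foldl
      (fun (st : Int × PySem.Dict String Int) item =>
        let counter :=
          if PySem.Str.upper ((PySem.List.pyGet? item 3).getD "") == i
          then st.1 + 1 else st.1
        (counter, st.2.insert i counter))
      (c0, dic)
    = (c0 + fcCnt i locls,
       if locls.isEmpty then dic else dic.insert i (c0 + fcCnt i locls)) := by
  induction locls generalizing c0 dic with
  | nil => simp [fcCnt]
  | cons x xs ih =>
      simp only [List.foldl_cons]
      rw [fcCnt_cons]
      simp only [fcKey]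
      split_ifs with hx <;>
        rw [ih] <;> clear ih <;>
        cases xs <;> simp_all [fcCnt, PySem.Dict.insert_insert_self] <;>
        first | omega | exact ⟨by omega, by congr 1 <;> omega⟩

lemma b_items (locls : List (List String)) :
    findCategory_alt locls =
      [("P", fcCnt "P" locls), ("H", fcCnt "H" locls), ("R", fcCnt "R" locls),
       ("C", fcCnt "C" locls), ("S", fcCnt "S" locls)] := by
  simp only [findCategory_alt]
  rw [bfold]
  simp

lemma a_items (locls : List (List String)) (h : locls ≠ []) :
    findCategory locls =
      [("P", fcCnt "P" locls), ("H", fcCnt "H" locls), ("R", fcCnt "R" locls),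
       ("C", fcCnt "C" locls), ("S", fcCnt "S" locls)] := by
  have he : locls.isEmpty = false := by simp [h]
  simp only [findCategory, List.foldl_cons, List.foldl_nil]
  rw [ainner, ainner, ainner, ainner, ainner]
  simp only [he, Bool.false_eq_true, if_false]
  simp [PySem.Dict.items_insert, PySem.Dict.contains_insert, PySem.Dict.empty]

-- ===== VERDICT =====
theorem findCategory_spec : Claim_unchanged_findCategory := by
  intro locls _ _ hD
  have h : locls ≠ [] := fun he => hD he
  rw [a_items locls h, b_items]

theorem findCategory_changed : Claim_changed_findCategory := by
  unfold Claim_changed_findCategory; decide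

theorem findCategory_tight : Claim_exact_findCategory := by
  intro locls _ _ hD
  have h : locls = [] := hD
  subst h
  decide
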